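-- pv_equiv track=rewrite | github.com/AdamZhouSE/pythonHomework | Code/CodeRecords/2542/60760/298213.py | func
-- ===== SOURCE A (Python) =====
-- def func(arr:list):
--     arr2=sorted(arr)
--     res=0
--     for i in range(len(arr2)):
--         count=0
--         for j in range(i,len(arr2)-1):
--             if arr2[j+1]-arr2[j]==1:
--                 count+=1
--         if count>res:
--             res=count
--
--
--     return res+1
-- ===== SOURCE B (Python) =====
-- def func(arr: list):
--     s = sorted(arr)
--     return 1 + sum(1 for x, y in zip(s, s[1:]) if y - x == 1)
-- ===== Notes on version B (the rewrite author's own statement) =====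
-- stated objective: faster
-- what changed: A's quadratic max-over-suffixes loop is replaced by a single pass over the sorted list: the suffix adjacent-difference counts are maximal at the full list, so the answer is 1 plus the number of adjacent sorted pairs differing by exactly 1.
import Mathlib
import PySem

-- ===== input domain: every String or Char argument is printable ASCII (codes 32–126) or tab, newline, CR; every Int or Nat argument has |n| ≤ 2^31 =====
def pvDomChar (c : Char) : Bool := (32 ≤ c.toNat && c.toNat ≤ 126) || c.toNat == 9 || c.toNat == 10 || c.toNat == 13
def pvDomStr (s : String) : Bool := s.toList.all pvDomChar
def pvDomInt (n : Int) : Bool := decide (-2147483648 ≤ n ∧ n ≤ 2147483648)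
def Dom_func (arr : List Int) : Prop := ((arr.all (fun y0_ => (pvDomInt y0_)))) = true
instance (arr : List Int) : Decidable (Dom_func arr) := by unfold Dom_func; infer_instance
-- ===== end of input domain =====

-- B replaces A's quadratic max-over-suffixes scan by one linear pass over the sorted list (asymptotically faster).

-- ===== PORT A =====
def func (arr : List Int) : Int :=
  let arr2 := PySem.List.sorted arr (fun x => x) false
  let res := (PySem.List.pyRange 0 (PySem.List.len arr2) 1).foldl (fun res i =>
      let count := (PySem.List.pyRange i (PySem.List.len arr2 - 1) 1).foldl
        (fun count j =>
          if PySem.List.pyGetD arr2 (j + 1) 0 - PySem.List.pyGetD arr2 j 0 = 1 then count + 1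
          else count) 0
      if count > res then count else res) 0
  res + 1

-- ===== PORT B =====
def func_alt (arr : List Int) : Int :=
  let s := PySem.List.sorted arr (fun x => x) false
  1 + ((s.zip (PySem.List.slice s (some 1) none)).countP (fun p => p.2 - p.1 == 1) : Int)

-- ===== PRECONDITION & SPEC =====
def Spec_func (arr : List Int) (out : Int) : Prop := out = func_alt arr
instance (arr : List Int) (out : Int) : Decidable (Spec_func arr out) := by unfold Spec_func; infer_instance

-- ===== CLAIM (what is proved, stated in full; the proofs are below) =====
def Claim_equal_func : Prop := ∀ (arr : List Int), Dom_func arr → Spec_func arr (func arr)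

-- ===== LEMMAS AND PROOFS =====

/-- Number of adjacent pairs differing by exactly 1 (proof-side characterisation). -/
def cAdj : List Int → Int
  | a :: b :: t => (if b - a = 1 then 1 else 0) + cAdj (b :: t)
  | _ => 0

theorem cAdj_nonneg (s : List Int) : 0 ≤ cAdj s := by
  induction s with
  | nil => simp [cAdj]
  | cons a t ih =>
    cases t with
    | nil => simp [cAdj]
    | cons b u => simp only [cAdj]; split_ifs <;> omega

theorem cAdj_short (s : List Int) (h : s.length ≤ 1) : cAdj s = 0 := by
  match s, h with
  | [], _ => rfl
  | [a], _ => rfl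

theorem cAdj_cons_le (a : Int) (t : List Int) : cAdj t ≤ cAdj (a :: t) := by
  cases t with
  | nil => simp [cAdj]
  | cons b u => simp only [cAdj]; split_ifs <;> omega

theorem cAdj_drop_le (k : Nat) (s : List Int) : cAdj (s.drop k) ≤ cAdj s := by
  induction k generalizing s with
  | zero => simp
  | succ k ih =>
    cases s with
    | nil => simp
    | cons a t =>
      calc cAdj ((a :: t).drop (k + 1)) = cAdj (t.drop k) := by simp
        _ ≤ cAdj t := ih t
        _ ≤ cAdj (a :: t) := cAdj_cons_le a t

/-- A's inner loop at start index i computes cAdj of the i-th suffix. -/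
theorem inner_eq (s : List Int) (m : Nat) :
    ∀ (i : Nat) (acc : Int), s.length - i ≤ m →
      (PySem.List.pyRange (i : Int) ((s.length : Int) - 1) 1).foldl
        (fun count j =>
          if PySem.List.pyGetD s (j + 1) 0 - PySem.List.pyGetD s j 0 = 1 then count + 1
          else count) acc = acc + cAdj (s.drop i) := by
  induction m with
  | zero =>
    intro i acc h
    have hge : (s.length : Int) - 1 ≤ (i : Int) := by omega
    rw [PySem.List.pyRange_one_eq_nil hge]
    have : (s.drop i).length ≤ 1 := by simp; omega
    simp [cAdj_short _ this]
  | succ m ih =>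
    intro i acc h
    by_cases hlt : (i : Int) < (s.length : Int) - 1
    · have hi1 : i + 1 < s.length := by omega
      have hi : i < s.length := by omega
      rw [PySem.List.pyRange_one_cons hlt]
      simp only [List.foldl_cons]
      have e1 : (i : Int) + 1 = ((i + 1 : Nat) : Int) := by push_cast; ring
      rw [e1, PySem.List.pyGetD_natCast, PySem.List.pyGetD_natCast,
        List.getD_eq_getElem _ _ hi1, List.getD_eq_getElem _ _ hi,
        ih (i + 1) _ (by omega)]
      have hd1 : s.drop i = s[i] :: s.drop (i + 1) := List.drop_eq_getElem_cons hi
      have hd2 : s.drop (i + 1) = s[i + 1] :: s.drop (i + 2) := List.drop_eq_getElem_cons hi1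
      rw [hd1, hd2, cAdj]
      rw [← hd2]
      split_ifs <;> omega
    · have hge : (s.length : Int) - 1 ≤ (i : Int) := by omega
      rw [PySem.List.pyRange_one_eq_nil hge]
      have : (s.drop i).length ≤ 1 := by simp; omega
      simp [cAdj_short _ this]

/-- A max-update fold over values all ≤ the accumulator leaves it unchanged. -/
theorem foldl_max_const (g : Int → Int) (l : List Int) (r0 : Int)
    (h : ∀ x ∈ l, g x ≤ r0) :
    l.foldl (fun r i => if g i > r then g i else r) r0 = r0 := by
  induction l with
  | nil => rfl
  | cons a t ih =>
    have ha : g a ≤ r0 := h a (by simp)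
    simp only [List.foldl_cons]
    rw [if_neg (by omega)]
    exact ih (fun x hx => h x (by simp [hx]))

/-- B's countP over zipped consecutive pairs is cAdj. -/
theorem countP_eq_cAdj (s : List Int) :
    ((s.zip s.tail).countP (fun p => p.2 - p.1 == 1) : Int) = cAdj s := by
  induction s with
  | nil => rfl
  | cons a t ih =>
    cases t with
    | nil => rfl
    | cons b u =>
      simp only [List.tail_cons, List.zip_cons_cons, List.countP_cons, cAdj] at *
      rw [← ih]
      by_cases hb : b - a = 1
      · simp [hb]; ring
      · simp [hb]

theorem func_eq_alt (arr : List Int) : func arr = func_alt arr := by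
  unfold func func_alt
  simp only [PySem.List.len_eq, PySem.List.slice_from_one]
  set s := PySem.List.sorted arr (fun x => x) false with hs
  rw [countP_eq_cAdj]
  have hinner : ∀ (i : Nat) (acc : Int),
      (PySem.List.pyRange (i : Int) ((s.length : Int) - 1) 1).foldl
        (fun count j =>
          if PySem.List.pyGetD s (j + 1) 0 - PySem.List.pyGetD s j 0 = 1 then count + 1
          else count) acc = acc + cAdj (s.drop i) :=
    fun i acc => inner_eq s s.length i acc (by omega)
  by_cases hnil : s = []
  · rw [hnil]; rfl
  · have h0 : (0 : Int) < (s.length : Int) := by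
      have := List.length_pos_iff.mpr hnil
      omega
    rw [PySem.List.pyRange_one_cons h0]
    simp only [List.foldl_cons]
    have h00 := hinner 0 0
    simp only [Nat.cast_zero, List.drop_zero, zero_add] at h00
    rw [h00]
    have hres : (if cAdj s > 0 then cAdj s else 0) = cAdj s := by
      have := cAdj_nonneg s
      split_ifs <;> omega
    rw [hres]
    rw [foldl_max_const _ _ _ ?_]
    · ring
    · intro x hx
      rw [PySem.List.mem_pyRange_one] at hx
      have hx0 : (0 : Int) ≤ x := by omega
      have := hinner x.toNat 0
      rw [Int.toNat_of_nonneg hx0] at this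
      simp only [zero_add] at this
      rw [this]
      exact cAdj_drop_le _ s

-- ===== VERDICT (by name: the statement is the Claim_ definition above) =====
theorem func_spec : Claim_equal_func := by
  intro arr _
  unfold Spec_func
  exact func_eq_alt arr
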